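-- pv_equiv track=rewrite | github.com/mit-ll-responsible-ai/responsible-ai-toolbox | src/rai_toolbox/datasets/_imagenet_base.py | remap_classes
-- ===== SOURCE A (Python) =====
-- from typing import Any, Callable, Dict, List, Optional, Set, Tuple, Union
--
-- def remap_classes(
--     range_sets: Tuple[Set[int], ...], class_to_idx: Dict[str, int]
-- ) -> Tuple[List[str], Dict[str, int]]:
--     """Filters existing classes and maps them to new index based on a pre-defined mapping.
--
--     Parameters
--     ----------
--     range_sets: Tuple[Set[int], ...]
--         Each element of the tuple is a list of indices that map the original class to the new class.
--
--     class_to_idx: Dict[str, int]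
--         Dictionary mapping class name to class index
--
--     Returns
--     -------
--     Tuple[List[str], Dict[str, int]]
--         List of classes and dictionary mapping each class to an index.
--     """
--     mapping = {}
--     for class_name, idx in class_to_idx.items():
--         for new_idx, range_set in enumerate(range_sets):
--             if idx in range_set:
--                 mapping[class_name] = new_idx
--                 break
--
--     filtered_classes = list(mapping.keys())
--     filtered_classes.sort()
--     return filtered_classes, mapping
-- ===== SOURCE B (Python) =====
-- def remap_classes(range_sets, class_to_idx):
--     # Invert the filter sets once: original index -> its first (lowest) new index.
--     idx2new = {}
--     for new_idx, range_set in enumerate(range_sets):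
--         for idx in range_set:
--             if idx not in idx2new:
--                 idx2new[idx] = new_idx
--     mapping = {}
--     for class_name, idx in class_to_idx.items():
--         new_idx = idx2new.get(idx)
--         if new_idx is not None:
--             mapping[class_name] = new_idx
--     return sorted(mapping), mapping
-- ===== Notes on version B (the rewrite author's own statement) =====
-- stated objective: alternative
-- what changed: B builds an inverted index from range_sets once (original index -> first new index) and then does one dict lookup per class, instead of A's per-class inner scan over all range_sets with a break.
import Mathlib
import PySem

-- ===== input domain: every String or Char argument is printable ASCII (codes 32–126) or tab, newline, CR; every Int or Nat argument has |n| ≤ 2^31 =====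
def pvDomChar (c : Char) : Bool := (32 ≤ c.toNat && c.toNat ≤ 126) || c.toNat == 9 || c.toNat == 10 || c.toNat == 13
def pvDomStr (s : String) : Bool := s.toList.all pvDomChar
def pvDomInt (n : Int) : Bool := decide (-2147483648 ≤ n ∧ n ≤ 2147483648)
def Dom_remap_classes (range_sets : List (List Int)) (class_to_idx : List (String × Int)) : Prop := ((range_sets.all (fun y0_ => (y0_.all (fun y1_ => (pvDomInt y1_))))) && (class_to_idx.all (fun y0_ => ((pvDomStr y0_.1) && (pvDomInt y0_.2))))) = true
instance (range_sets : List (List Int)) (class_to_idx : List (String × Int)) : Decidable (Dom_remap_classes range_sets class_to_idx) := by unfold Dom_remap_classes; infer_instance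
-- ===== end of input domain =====

-- B inverts the filter sets once into a dict (original index -> first new index), so the
-- per-class inner scan over range_sets becomes a single dict lookup (objective: alternative).

-- ===== PORT A =====
-- inner loop of A: 'for new_idx, range_set in enumerate(range_sets): if idx in range_set: mapping[...] = new_idx; break'
def pvAScan (m : PySem.Dict String Int) (name : String) (idx : Int) : List (Int × List Int) → PySem.Dict String Int
  | [] => m
  | (newIdx, rangeSet) :: rest =>
      if idx ∈ rangeSet then m.insert name newIdx else pvAScan m name idx rest

def remap_classes (range_sets : List (List Int)) (class_to_idx : List (String × Int)) : List String × (List (String × Int)) :=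
  let mapping := class_to_idx.foldl
    (fun m p => pvAScan m p.1 p.2 (PySem.List.enumerate range_sets 0)) PySem.Dict.empty
  let filtered_classes := PySem.List.sorted mapping.keys (fun x => x) false
  (filtered_classes, mapping.items)

-- ===== PORT B =====
def remap_classes_alt (range_sets : List (List Int)) (class_to_idx : List (String × Int)) : List String × (List (String × Int)) :=
  let idx2new := (PySem.List.enumerate range_sets 0).foldl
    (fun d p => p.2.foldl (fun d idx => if d.contains idx then d else d.insert idx p.1) d)
    PySem.Dict.empty
  let mapping := class_to_idx.foldl
    (fun m p => match idx2new.get? p.2 with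
      | some n => m.insert p.1 n
      | none => m) PySem.Dict.empty
  (PySem.List.sorted mapping.keys (fun x => x) false, mapping.items)

-- ===== PRECONDITION & SPEC =====
def Spec_remap_classes (range_sets : List (List Int)) (class_to_idx : List (String × Int)) (out : List String × (List (String × Int))) : Prop := out = remap_classes_alt range_sets class_to_idx
instance (range_sets : List (List Int)) (class_to_idx : List (String × Int)) (out : List String × (List (String × Int))) : Decidable (Spec_remap_classes range_sets class_to_idx out) := by unfold Spec_remap_classes; infer_instance

-- ===== CLAIM (what is proved, stated in full; the proofs are below) =====
def Claim_equal_remap_classes : Prop := ∀ (range_sets : List (List Int)) (class_to_idx : List (String × Int)), Dom_remap_classes range_sets class_to_idx → Spec_remap_classes range_sets class_to_idx (remap_classes range_sets class_to_idx)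

-- ===== LEMMAS AND PROOFS =====

-- first new index assigned to idx by the enumerated sets, in scan order
def pvFirst (l : List (Int × List Int)) (idx : Int) : Option Int :=
  match l with
  | [] => none
  | (n, s) :: rest => if idx ∈ s then some n else pvFirst rest idx

theorem pvAScan_eq (m : PySem.Dict String Int) (name : String) (idx : Int)
    (l : List (Int × List Int)) :
    pvAScan m name idx l = (match pvFirst l idx with
      | some n => m.insert name n
      | none => m) := by
  induction l with
  | nil => rfl
  | cons p rest ih =>
      obtain ⟨n, s⟩ := p
      simp only [pvAScan, pvFirst]
      split_ifs with h <;> simp [ih]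

theorem inner_get? (rs : List Int) (n : Int) (d : PySem.Dict Int Int) (x : Int) :
    (rs.foldl (fun d idx => if d.contains idx then d else d.insert idx n) d).get? x
      = (d.get? x).or (if x ∈ rs then some n else none) := by
  induction rs generalizing d with
  | nil => simp
  | cons i rest ih =>
      simp only [List.foldl_cons]
      by_cases hc : d.contains i
      · rw [if_pos hc, ih]
        by_cases hx : x = i
        · subst hx
          rw [PySem.Dict.contains_eq_isSome_get?] at hc
          cases h : d.get? x with
          | none => rw [h] at hc; simp at hc
          | some v => simp
        · simp [List.mem_cons, hx]
      · rw [if_neg hc, ih]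
        by_cases hx : x = i
        · subst hx
          rw [PySem.Dict.contains_eq_isSome_get?] at hc
          cases h : d.get? x with
          | none => simp [PySem.Dict.get?_insert_self]
          | some v => rw [h] at hc; simp at hc
        · rw [PySem.Dict.get?_insert_of_ne _ _ hx]
          simp [List.mem_cons, hx]

theorem outer_get? (l : List (Int × List Int)) (d : PySem.Dict Int Int) (x : Int) :
    (l.foldl (fun d p => p.2.foldl (fun d idx => if d.contains idx then d else d.insert idx p.1) d) d).get? x
      = (d.get? x).or (pvFirst l x) := by
  induction l generalizing d with
  | nil => simp [pvFirst]
  | cons p rest ih =>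
      obtain ⟨n, s⟩ := p
      simp only [List.foldl_cons, pvFirst]
      rw [ih, inner_get? s n d x]
      by_cases hx : x ∈ s
      · simp only [if_pos hx]
        cases d.get? x <;> simp
      · simp [hx]

theorem idx2new_get? (range_sets : List (List Int)) (x : Int) :
    ((PySem.List.enumerate range_sets 0).foldl
      (fun d p => p.2.foldl (fun d idx => if d.contains idx then d else d.insert idx p.1) d)
      PySem.Dict.empty).get? x = pvFirst (PySem.List.enumerate range_sets 0) x := by
  rw [outer_get?]
  simp

-- ===== VERDICT (by name: the statement is the Claim_ definition above) =====
theorem remap_classes_spec : Claim_equal_remap_classes := by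
  intro range_sets class_to_idx _
  show _ = _
  unfold remap_classes remap_classes_alt
  have hfold : (fun (m : PySem.Dict String Int) (p : String × Int) =>
        pvAScan m p.1 p.2 (PySem.List.enumerate range_sets 0))
      = (fun m p => match
          ((PySem.List.enumerate range_sets 0).foldl
            (fun d q => q.2.foldl (fun d idx => if d.contains idx then d else d.insert idx q.1) d)
            PySem.Dict.empty).get? p.2 with
          | some n => m.insert p.1 n
          | none => m) := by
    funext m p
    rw [pvAScan_eq, idx2new_get?]
  simp only [hfold]
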